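-- pv_equiv track=rewrite | github.com/Jmenz1997/Python-Programs- | Python/LenOfConsecutiveNumbers.py | sequenceMax
-- ===== SOURCE A (Python) =====
-- def sequenceMax(nombres):#<----Fonction qui prend un seule paramètre une liste.
--     i = 0                #<----Définition de 'i' égale a '0'.
--     M = 0                #<----Variable 'M' qui représente la langeur maximale.
--     while 0 <= i < len(nombres):#<---- Utiliser la boucle 'while' tant que le 'i' est entre 0 et la langeur de la liste.
--         t = 1                   #<----Variable qui enregistre temporairement la longeurs des élements consécutive.
--         for j in range(i+1, len(nombres)):#<----Utilisation de la boucle "For".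
--             if nombres[j] != nombres[i]:  #<----Condition Si élément de nombres[j] n'égale pas a nombres[i] alors i=j et le programme sera suspendu et va sauter les ligne et recomence la boucle.
--                 i = j
--                 break
--             t += 1                        #<----Dans le cas ou nombres[j]==nombres[i] le programme va ajouter a 't' +1 qui est notre compteur de notre liste.
--             i += 1                        #<----i+=1 a chaque boucle on ajout a 'i'+1.
--         if t > M:
--             M = t
--         if i == len(nombres) - 1:
--             M==1
--             break
--     return M
-- ===== SOURCE B (Python) =====
-- def sequenceMax(nombres):
--     # Boundary decomposition: collect indices where a new run starts, bracket
--     # with 0 and len, and return the largest gap between consecutive boundaries.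
--     if not nombres:
--         return 0
--     n = len(nombres)
--     bounds = [0] + [i for i in range(1, n) if nombres[i] != nombres[i - 1]] + [n]
--     return max(bounds[k + 1] - bounds[k] for k in range(len(bounds) - 1))
-- ===== Notes on version B (the rewrite author's own statement) =====
-- stated objective: alternative
-- what changed: Replaces A's anchor-comparison while/for loop with break-driven index juggling by a two-pass boundary decomposition: build the list of run-start indices (where nombres[i] != nombres[i-1]) bracketed by 0 and len, then return the maximum difference between consecutive boundaries.
import Mathlib
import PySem

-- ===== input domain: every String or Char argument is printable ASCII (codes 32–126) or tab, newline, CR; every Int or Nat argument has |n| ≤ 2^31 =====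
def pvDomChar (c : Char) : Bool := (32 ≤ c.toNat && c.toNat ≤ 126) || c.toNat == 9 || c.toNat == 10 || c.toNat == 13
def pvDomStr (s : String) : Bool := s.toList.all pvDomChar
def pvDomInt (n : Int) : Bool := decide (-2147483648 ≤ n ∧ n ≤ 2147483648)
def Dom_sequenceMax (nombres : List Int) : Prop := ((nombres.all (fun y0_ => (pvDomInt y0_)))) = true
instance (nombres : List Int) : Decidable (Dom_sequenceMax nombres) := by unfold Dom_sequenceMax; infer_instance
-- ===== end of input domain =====

-- B replaces A's nested anchor-scan loop by a boundary-index decomposition (same O(n) cost, different shape).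


-- ===== PORT A =====
-- inner `for j in range(i+1, len)` loop of A: state (i, t); returns the (i, t) left behind at break or exhaustion.
-- i stays ≥ 0 in Python (starts at 0, only ever increased), so indices are Nat and getD is exact on the in-range
-- accesses the loop makes; `fuel` only makes the recursion total (it never runs out before the loop's own exit).
def innerA (ns : List Int) : Nat → Nat → Int → Nat → Nat × Int
  | 0, i, t, _ => (i, t)
  | fuel+1, i, t, j =>
    if j < ns.length then
      if ns.getD j 0 ≠ ns.getD i 0 then (j, t)
      else innerA ns fuel (i+1) (t+1) (j+1)
    else (i, t)

-- outer `while 0 <= i < len(nombres)` loop of A; the no-op statement `M==1` is dropped.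
-- `fuel` only makes the recursion total: i strictly increases, so ns.length iterations always suffice.
def outerA (ns : List Int) : Nat → Nat → Int → Int
  | 0, _, M => M
  | fuel+1, i, M =>
    if i < ns.length then
      let p := innerA ns ns.length i 1 (i+1)
      let M' := if p.2 > M then p.2 else M
      if p.1 = ns.length - 1 then M'
      else outerA ns fuel p.1 M'
    else M

def sequenceMax (nombres : List Int) : Int := outerA nombres nombres.length 0 0

-- ===== PORT B =====
-- boundary decomposition from Source B: bounds = [0] + [i in 1..n-1 | ns[i] != ns[i-1]] + [n]; answer = max adjacent gap.
-- range(1, n) is List.range' 1 (n-1); indices i, i-1 are always in range, so getD is exact.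
-- the max(...) generator is nonempty (bounds has ≥ 2 elements), so the .getD 0 default is never used.
def sequenceMax_alt (nombres : List Int) : Int :=
  if nombres.length = 0 then 0
  else
    let bounds : List Nat :=
      0 :: ((List.range' 1 (nombres.length - 1)).filter
              (fun i => nombres.getD i 0 != nombres.getD (i-1) 0) ++ [nombres.length])
    let diffs : List Int := (bounds.zip bounds.tail).map (fun p => (p.2 : Int) - (p.1 : Int))
    (PySem.List.max? diffs (fun x => x)).getD 0

-- ===== PRECONDITION & SPEC =====
def Spec_sequenceMax (nombres : List Int) (out : Int) : Prop := out = sequenceMax_alt nombres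
instance (nombres : List Int) (out : Int) : Decidable (Spec_sequenceMax nombres out) := by unfold Spec_sequenceMax; infer_instance

-- ===== CLAIM (what is proved, stated in full; the proofs are below) =====
def Claim_equal_sequenceMax : Prop := ∀ (nombres : List Int), Dom_sequenceMax nombres → Spec_sequenceMax nombres (sequenceMax nombres)

-- ===== LEMMAS AND PROOFS =====

-- nextB ns j = first index k ≥ j with ns[k] ≠ ns[k-1], or ns.length if none
def nextB (ns : List Int) (j : Nat) : Nat :=
  if h : j < ns.length then
    if ns.getD j 0 ≠ ns.getD (j-1) 0 then j else nextB ns (j+1)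
  else ns.length
termination_by ns.length - j
decreasing_by omega

theorem nextB_le (ns : List Int) (j : Nat) : nextB ns j ≤ ns.length := by
  unfold nextB
  split
  · split
    · omega
    · exact nextB_le ns (j+1)
  · omega
termination_by ns.length - j
decreasing_by omega

theorem nextB_ge (ns : List Int) (j : Nat) (hj : j ≤ ns.length) : j ≤ nextB ns j := by
  unfold nextB
  split
  · split
    · omega
    · have := nextB_ge ns (j+1) (by omega)
      omega
  · omega
termination_by ns.length - j
decreasing_by omega

-- characterisation of A's inner loop in terms of nextB
theorem innerA_eq (ns : List Int) (fuel j i : Nat) (t : Int) (hij : i + 1 = j)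
    (hj : j ≤ ns.length) (hf : ns.length ≤ fuel + j) :
    innerA ns fuel i t j
      = (if nextB ns j = ns.length then ns.length - 1 else nextB ns j,
         t + ((nextB ns j - j : Nat) : Int)) := by
  induction fuel generalizing j i t with
  | zero =>
    have hjlen : j = ns.length := by omega
    have hb : nextB ns j = ns.length := by rw [nextB, dif_neg (by omega)]
    rw [innerA, hb, if_pos rfl]
    simp [hjlen]
    omega
  | succ f ih =>
    rw [innerA]
    by_cases h : j < ns.length
    · rw [if_pos h]
      have hji : j - 1 = i := by omega
      by_cases hne : ns.getD j 0 ≠ ns.getD i 0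
      · have hb : nextB ns j = j := by rw [nextB, dif_pos h, if_pos (by rw [hji]; exact hne)]
        rw [if_pos hne, hb, if_neg (by omega : ¬ j = ns.length)]
        simp
      · have hb : nextB ns j = nextB ns (j+1) := by rw [nextB, dif_pos h, if_neg (by rw [hji]; exact hne)]
        rw [if_neg hne, ih (j+1) (i+1) (t+1) (by omega) (by omega) (by omega), hb]
        have hge := nextB_ge ns (j+1) (by omega)
        have harith : t + 1 + ((nextB ns (j+1) - (j+1) : Nat) : Int)
            = t + ((nextB ns (j+1) - j : Nat) : Int) := by omega
        rw [harith]
    · rw [if_neg h]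
      have hjlen : j = ns.length := by omega
      have hb : nextB ns j = ns.length := by rw [nextB, dif_neg h]
      rw [hb, if_pos rfl]
      simp [hjlen]
      omega

-- max run length of the suffix starting at run-start i (for i < ns.length)
def chain (ns : List Int) (i : Nat) : Int :=
  if _h : i < ns.length then
    let b := nextB ns (i+1)
    if b < ns.length then max ((b : Int) - i) (chain ns b) else (ns.length : Int) - i
  else 0
termination_by ns.length - i
decreasing_by
  have := nextB_ge ns (i+1) (by omega)
  omega

theorem chain_pos (ns : List Int) (i : Nat) (hi : i < ns.length) : 1 ≤ chain ns i := by
  rw [chain, dif_pos hi]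
  have hge := nextB_ge ns (i+1) (by omega)
  by_cases hb : nextB ns (i+1) < ns.length
  · simp only [hb, if_pos]
    have : (1 : Int) ≤ (nextB ns (i+1) : Int) - i := by omega
    exact le_trans this (le_max_left _ _)
  · simp only [hb, if_false]
    omega

-- A's outer loop computes max M (chain ns i) when entered at a run start i < len with enough fuel
theorem aeq (ns : List Int) (fuel i : Nat) (hi : i < ns.length) (hf : ns.length ≤ fuel + i) (M : Int) :
    outerA ns fuel i M = max M (chain ns i) := by
  induction fuel generalizing i M with
  | zero => omega
  | succ f ih =>
    have he := innerA_eq ns ns.length (i+1) i 1 rfl (by omega) (by omega)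
    have hge := nextB_ge ns (i+1) (by omega)
    have hle := nextB_le ns (i+1)
    have ht : (1 : Int) + ((nextB ns (i+1) - (i+1) : Nat) : Int) = (nextB ns (i+1) : Int) - i := by
      omega
    rw [outerA, if_pos hi]
    simp only [he, ht]
    rw [chain, dif_pos hi]
    by_cases hb : nextB ns (i+1) = ns.length
    · -- inner loop exhausted: i' = len-1, break; chain = len - i
      rw [if_neg (show ¬ nextB ns (i+1) < ns.length by omega), hb, if_pos rfl]
      rcases le_total M ((ns.length : Int) - i) with h' | h' <;> simp [max_def] <;> omega
    · have hblt : nextB ns (i+1) < ns.length := by omega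
      rw [if_neg hb, if_pos hblt]
      by_cases hlast : nextB ns (i+1) = ns.length - 1
      · -- break at i' = len-1: the final run has length 1, already dominated
        rw [if_pos hlast]
        have hcb : chain ns (nextB ns (i+1)) = 1 := by
          rw [chain, dif_pos hblt]
          have h1 := nextB_ge ns (nextB ns (i+1) + 1) (by omega)
          have h2 := nextB_le ns (nextB ns (i+1) + 1)
          rw [if_neg (by omega)]
          omega
        rw [hcb]
        have h2 : (1 : Int) ≤ (nextB ns (i+1) : Int) - i := by omega
        rw [max_eq_left h2]
        rcases le_total M ((nextB ns (i+1) : Int) - i) with h' | h' <;> simp [max_def] <;> omega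
      · rw [if_neg hlast]
        rw [ih (nextB ns (i+1)) hblt (by omega)]
        rcases le_total M ((nextB ns (i+1) : Int) - i) with h' | h' <;>
          rcases le_total ((nextB ns (i+1) : Int) - i) (chain ns (nextB ns (i+1))) with h'' | h'' <;>
          simp [max_def] <;> omega

-- B's boundary list from position j is driven by nextB
theorem filt (ns : List Int) (j : Nat) (hj : 1 ≤ j) :
    (List.range' j (ns.length - j)).filter (fun k => ns.getD k 0 != ns.getD (k-1) 0)
      = if nextB ns j < ns.length then
          nextB ns j ::
            (List.range' (nextB ns j + 1) (ns.length - (nextB ns j + 1))).filter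
              (fun k => ns.getD k 0 != ns.getD (k-1) 0)
        else [] := by
  by_cases h : j < ns.length
  · have hsplit : ns.length - j = (ns.length - (j+1)) + 1 := by omega
    rw [hsplit, List.range'_succ, List.filter_cons]
    by_cases hne : ns.getD j 0 ≠ ns.getD (j-1) 0
    · have hb : nextB ns j = j := by rw [nextB, dif_pos h, if_pos hne]
      simp only [hb, if_pos h]
      rw [if_pos (by simpa using hne)]
    · have hb : nextB ns j = nextB ns (j+1) := by rw [nextB, dif_pos h, if_neg hne]
      rw [if_neg (by simpa using hne)]
      rw [filt ns (j+1) (by omega), hb]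
  · have h0 : ns.length - j = 0 := by omega
    have hb : nextB ns j = ns.length := by rw [nextB, dif_neg h]
    rw [h0, hb]
    simp
termination_by ns.length - j
decreasing_by omega

def diffsOf : Nat → List Nat → List Int
  | _, [] => []
  | a, b :: t => ((b : Int) - (a : Int)) :: diffsOf b t

theorem zipmap (l : List Nat) (a : Nat) :
    (List.zip (a :: l) l).map (fun p => (p.2 : Int) - (p.1 : Int)) = diffsOf a l := by
  induction l generalizing a with
  | nil => simp [diffsOf]
  | cons b t ih =>
    rw [List.zip_cons_cons, List.map_cons, ih b]
    simp [diffsOf]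

-- folding max over B's gap list from run-start i yields max M (chain ns i)
theorem lmax (ns : List Int) (i : Nat) (hi : i < ns.length) (M : Int) :
    (diffsOf i ((List.range' (i+1) (ns.length - (i+1))).filter
        (fun k => ns.getD k 0 != ns.getD (k-1) 0) ++ [ns.length])).foldl max M
      = max M (chain ns i) := by
  have hge := nextB_ge ns (i+1) (by omega)
  have hle := nextB_le ns (i+1)
  rw [filt ns (i+1) (by omega), chain, dif_pos hi]
  by_cases hb : nextB ns (i+1) < ns.length
  · rw [if_pos hb, if_pos hb]
    simp only [List.cons_append, diffsOf, List.foldl]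
    rw [lmax ns (nextB ns (i+1)) hb (max M ((nextB ns (i+1) : Int) - i))]
    rw [max_assoc]
  · rw [if_neg hb, if_neg hb]
    simp [diffsOf]
termination_by ns.length - i
decreasing_by omega

-- ===== VERDICT (by name: the statement is the Claim_ definition above) =====
theorem sequenceMax_spec : Claim_equal_sequenceMax := by
  intro ns _
  show sequenceMax ns = sequenceMax_alt ns
  unfold sequenceMax sequenceMax_alt
  by_cases h0 : ns.length = 0
  · rw [if_pos h0, h0, outerA]
  · rw [if_neg h0]
    have hlen : 0 < ns.length := by omega
    simp only [List.tail_cons, zipmap]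
    have hA : outerA ns ns.length 0 0 = chain ns 0 := by
      rw [aeq ns ns.length 0 hlen (by omega) 0,
        max_eq_right (le_trans (by omega) (chain_pos ns 0 hlen))]
    rw [hA]
    have hge := nextB_ge ns 1 (by omega)
    have hle := nextB_le ns 1
    have hfilt := filt ns 1 (le_refl 1)
    by_cases hb : nextB ns 1 < ns.length
    · rw [hfilt, if_pos hb]
      simp only [List.cons_append, diffsOf, PySem.List.max?_id_cons, Option.getD_some]
      have := lmax ns (nextB ns 1) hb ((nextB ns 1 : Int) - (0 : Nat))
      rw [this]
      rw [chain, dif_pos hlen]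
      rw [if_pos (by simpa using hb)]
    · rw [hfilt, if_neg hb]
      simp only [List.nil_append, diffsOf, PySem.List.max?_id_cons, List.foldl_nil, Option.getD_some]
      rw [chain, dif_pos hlen]
      rw [if_neg (by simpa using hb)]
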